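-- pv_equiv track=rewrite | github.com/Piyush170502/Melosphere-AI | blend_utils.py | interleave_words
-- ===== SOURCE A (Python) =====
-- def interleave_words(original, translations_by_lang):
--     """Interleave words across provided translations. Preserves order within each language."""
--     tokenized = [t.split() for t in translations_by_lang]
--     max_len = max((len(t) for t in tokenized), default=0)
--     blended_tokens = []
--     for i in range(max_len):
--         for tok_list in tokenized:
--             if i < len(tok_list):
--                 blended_tokens.append(tok_list[i])
--     return " ".join(blended_tokens)
-- ===== SOURCE B (Python) =====
-- def interleave_words(original, translations_by_lang):
--     """Interleave words across provided translations. Preserves order within each language."""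
--     tokenized = [t.split() for t in translations_by_lang]
--     out = []
--     while any(tokenized):
--         for t in tokenized:
--             if t:
--                 out.append(t[0])
--         tokenized = [t[1:] for t in tokenized]
--     return " ".join(out)
-- ===== Notes on version B (the rewrite author's own statement) =====
-- stated objective: alternative
-- what changed: Replaces the index-based double loop (compute max_len, then tok_list[i] for i in range(max_len)) by column-wise consumption: repeatedly emit the current head of every nonempty token list and drop it, so no max_len and no indexing are needed.
import Mathlib
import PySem

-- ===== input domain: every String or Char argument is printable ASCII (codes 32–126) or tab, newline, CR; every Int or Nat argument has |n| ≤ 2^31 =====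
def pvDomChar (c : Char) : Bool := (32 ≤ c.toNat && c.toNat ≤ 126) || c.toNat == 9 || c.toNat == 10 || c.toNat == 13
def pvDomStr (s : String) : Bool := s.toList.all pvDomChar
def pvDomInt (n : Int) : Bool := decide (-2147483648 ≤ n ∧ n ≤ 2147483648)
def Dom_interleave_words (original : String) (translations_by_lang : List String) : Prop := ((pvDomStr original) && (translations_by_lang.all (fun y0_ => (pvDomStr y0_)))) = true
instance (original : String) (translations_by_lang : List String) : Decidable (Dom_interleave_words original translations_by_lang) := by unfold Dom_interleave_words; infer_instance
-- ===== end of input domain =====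

-- B replaces A's index-based double loop (max_len, then tok_list[i]) by column-wise
-- consumption of the token lists (emit every current head, drop it, repeat): an
-- alternative decomposition of the same cost. Equivalence of return values is proved
-- for all inputs; neither program mutates its arguments.

-- ===== PORT A =====
def interleave_words (original : String) (translations_by_lang : List String) : String :=
  let tokenized := translations_by_lang.map PySem.Str.split₀
  let max_len := PySem.List.maxD (tokenized.map List.length) (fun x => x) 0
  let blended_tokens := (List.range max_len).foldl (fun acc i =>
      tokenized.foldl (fun acc tok_list =>
        if h : i < tok_list.length then acc ++ [tok_list[i]] else acc) acc) ([] : List String)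
  PySem.Str.join " " blended_tokens

-- ===== PORT B =====
-- termination measure for the column loop: the total number of remaining tokens drops
theorem pvSumTailLe (T : List (List String)) :
    ((T.map List.tail).map List.length).sum ≤ (T.map List.length).sum := by
  induction T with
  | nil => simp
  | cons a T ih =>
    simp only [List.map_cons, List.sum_cons]
    have : a.tail.length ≤ a.length := by
      cases a <;> simp
    omega

theorem pvSumTailLt (T : List (List String)) (h : T.any (fun t => !t.isEmpty) = true) :
    ((T.map List.tail).map List.length).sum < (T.map List.length).sum := by
  induction T with
  | nil => simp at h
  | cons a T ih =>
    simp only [List.any_cons, Bool.or_eq_true] at h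
    simp only [List.map_cons, List.sum_cons]
    rcases h with h | h
    · have ha : a ≠ [] := by
        simp only [Bool.not_eq_eq_eq_not, Bool.not_true, List.isEmpty_eq_false_iff] at h
        exact h
      have : a.tail.length < a.length := by
        cases a with
        | nil => exact absurd rfl ha
        | cons x xs => simp
      have := pvSumTailLe T
      omega
    · have h2 := ih h
      have : a.tail.length ≤ a.length := by cases a <;> simp
      omega

-- 'while any(tokenized): emit heads of the nonempty lists; drop one token from each'
def pvCols (ls : List (List String)) : List String :=
  if h : ls.any (fun t => !t.isEmpty) = true then
    ls.filterMap List.head? ++ pvCols (ls.map List.tail)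
  else []
termination_by (ls.map List.length).sum
decreasing_by simpa using pvSumTailLt ls h

def interleave_words_alt (original : String) (translations_by_lang : List String) : String :=
  let tokenized := translations_by_lang.map PySem.Str.split₀
  PySem.Str.join " " (pvCols tokenized)

-- ===== PRECONDITION & SPEC =====
def Spec_interleave_words (original : String) (translations_by_lang : List String) (out : String) : Prop := out = interleave_words_alt original translations_by_lang
instance (original : String) (translations_by_lang : List String) (out : String) : Decidable (Spec_interleave_words original translations_by_lang out) := by unfold Spec_interleave_words; infer_instance

-- ===== CLAIM (what is proved, stated in full; the proofs are below) =====
def Claim_equal_interleave_words : Prop := ∀ (original : String) (translations_by_lang : List String), Dom_interleave_words original translations_by_lang → Spec_interleave_words original translations_by_lang (interleave_words original translations_by_lang)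

-- ===== LEMMAS AND PROOFS =====

-- A's inner loop over the token lists collects exactly the tokens at position i
theorem pvInnerA (T : List (List String)) (i : Nat) (acc : List String) :
    T.foldl (fun acc tok_list =>
        if h : i < tok_list.length then acc ++ [tok_list[i]] else acc) acc
      = acc ++ T.filterMap (fun t => t[i]?) := by
  induction T generalizing acc with
  | nil => simp
  | cons a T ih =>
    simp only [List.foldl_cons, List.filterMap_cons]
    by_cases h : i < a.length
    · simp only [dif_pos h, ih, List.getElem?_eq_getElem h, List.append_assoc,
        List.singleton_append]
    · have hn : a[i]? = none := List.getElem?_eq_none (Nat.le_of_not_lt h)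
      simp only [dif_neg h, ih, hn]

-- A's outer loop over range(max_len) is a flatMap of the per-position collections
theorem pvOuterA (T : List (List String)) (m : Nat) (racc : List String) :
    (List.range m).foldl (fun acc i =>
        T.foldl (fun acc tok_list =>
          if h : i < tok_list.length then acc ++ [tok_list[i]] else acc) acc) racc
      = racc ++ (List.range m).flatMap (fun i => T.filterMap (fun t => t[i]?)) := by
  have h1 := PySem.List.foldl_congr_mem (l := List.range m) (init := racc)
    (f := fun acc i => T.foldl (fun acc tok_list =>
      if h : i < tok_list.length then acc ++ [tok_list[i]] else acc) acc)
    (g := fun acc i => acc ++ T.filterMap (fun t => t[i]?))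
    (fun acc i _ => pvInnerA T i acc)
  rw [h1, PySem.List.foldl_append_eq_flatMap]

-- Python's max(..., default=0) over the lengths is the running max from 0
theorem pvMaxD_eq (l : List Nat) :
    PySem.List.maxD l (fun x => x) 0 = l.foldl max 0 := by
  cases l with
  | nil => rfl
  | cons x t =>
    simp only [PySem.List.maxD, PySem.List.max?_id_cons, Option.getD_some,
      List.foldl_cons, Nat.zero_max]

-- some token list is nonempty iff the max length is positive
theorem pvAnyIff (T : List (List String)) :
    T.any (fun t => !t.isEmpty) = true ↔ 0 < (T.map List.length).foldl max 0 := by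
  constructor
  · intro h
    simp only [List.any_eq_true, Bool.not_eq_eq_eq_not, Bool.not_true,
      List.isEmpty_eq_false_iff] at h
    obtain ⟨t, ht, hne⟩ := h
    have h1 : t.length ≤ (T.map List.length).foldl max 0 :=
      (PySem.List.le_foldl_max (T.map List.length) 0).2 _ (List.mem_map_of_mem ht)
    have h2 : 0 < t.length := List.length_pos_iff.mpr hne
    omega
  · intro h
    rcases PySem.List.foldl_max_mem (T.map List.length) 0 with heq | hmem
    · omega
    · rw [List.mem_map] at hmem
      obtain ⟨t, ht, hlen⟩ := hmem
      simp only [List.any_eq_true, Bool.not_eq_eq_eq_not, Bool.not_true,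
        List.isEmpty_eq_false_iff]
      exact ⟨t, ht, by rw [← List.length_pos_iff]; omega⟩

-- dropping one from every count drops the running max by one
theorem pvFoldlMaxSub (l : List Nat) : ∀ a : Nat,
    (l.map (fun x => x - 1)).foldl max (a - 1) = l.foldl max a - 1 := by
  induction l with
  | nil => intro a; simp
  | cons x t ih =>
    intro a
    simp only [List.map_cons, List.foldl_cons]
    have : max (a - 1) (x - 1) = max a x - 1 := by omega
    rw [this, ih]

theorem pvMaxLenTail (T : List (List String)) :
    ((T.map List.tail).map List.length).foldl max 0
      = (T.map List.length).foldl max 0 - 1 := by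
  have : (T.map List.tail).map List.length = (T.map List.length).map (fun x => x - 1) := by
    simp only [List.map_map]
    refine List.map_congr_left ?_
    intro t _
    cases t <;> simp
  rw [this]
  exact pvFoldlMaxSub (T.map List.length) 0

-- the column loop equals the positional flatMap up to the max length
theorem pvColsEq (n : Nat) : ∀ T : List (List String),
    (T.map List.length).foldl max 0 = n →
    pvCols T = (List.range n).flatMap (fun i => T.filterMap (fun t => t[i]?)) := by
  induction n with
  | zero =>
    intro T hM
    rw [pvCols.eq_def]
    have : ¬ (T.any (fun t => !t.isEmpty) = true) := by
      rw [pvAnyIff]; omega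
    simp [this]
  | succ n ih =>
    intro T hM
    have hany : T.any (fun t => !t.isEmpty) = true := by
      rw [pvAnyIff]; omega
    rw [pvCols.eq_def, dif_pos hany, List.range_succ_eq_map, List.flatMap_cons,
      List.flatMap_map]
    have hhead : T.filterMap List.head? = T.filterMap (fun t => t[0]?) := by
      refine List.filterMap_congr ?_
      intro t _
      exact List.head?_eq_getElem?
    have htail : pvCols (T.map List.tail)
        = (List.range n).flatMap (fun i => T.filterMap (fun t => t[i.succ]?)) := by
      rw [ih (T.map List.tail) (by rw [pvMaxLenTail, hM]; omega)]
      refine List.flatMap_congr ?_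
      intro i _
      rw [List.filterMap_map]
      refine List.filterMap_congr ?_
      intro t _
      simp only [Function.comp_apply, List.getElem?_tail, Nat.succ_eq_add_one]
    rw [hhead, htail]

-- ===== VERDICT (by name: the statement is the Claim_ definition above) =====
theorem interleave_words_spec : Claim_equal_interleave_words := by
  intro original translations_by_lang _
  simp only [Spec_interleave_words, interleave_words, interleave_words_alt]
  rw [pvOuterA, List.nil_append, pvMaxD_eq,
    pvColsEq (((translations_by_lang.map PySem.Str.split₀).map List.length).foldl max 0)
      (translations_by_lang.map PySem.Str.split₀) rfl]
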